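-- pv_equiv track=rewrite | github.com/anotherras/IR_Spectrum_Curve_Extractor | test.py | find_leftmost_subarray
-- ===== SOURCE A (Python) =====
-- def find_leftmost_subarray(arr, threshold):
--     n = len(arr)
--     left = None
--     right = None
--
--     i = 0
--     while i < n:
--         if arr[i] > threshold:
--             left = i
--             j = i
--             while j < n and arr[j] > threshold:
--                 j += 1
--             right = j - 1
--             return (left, right)
--         i += 1
--
--     return (None, None)
-- ===== SOURCE B (Python) =====
-- def find_leftmost_subarray(arr, threshold):
--     # staged passes: build a boolean mask, then locate the run with library searches
--     mask = [x > threshold for x in arr]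
--     if True not in mask:
--         return (None, None)
--     left = mask.index(True)
--     rest = mask[left:]
--     if False in rest:
--         return (left, left + rest.index(False) - 1)
--     return (left, len(arr) - 1)
-- ===== Notes on version B (the rewrite author's own statement) =====
-- stated objective: idiomatic
-- what changed: replaces A's explicit outer/inner index loops by staged passes: a boolean mask built once, then list.index searches for the run start and for the first failing element after it
import Mathlib
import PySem

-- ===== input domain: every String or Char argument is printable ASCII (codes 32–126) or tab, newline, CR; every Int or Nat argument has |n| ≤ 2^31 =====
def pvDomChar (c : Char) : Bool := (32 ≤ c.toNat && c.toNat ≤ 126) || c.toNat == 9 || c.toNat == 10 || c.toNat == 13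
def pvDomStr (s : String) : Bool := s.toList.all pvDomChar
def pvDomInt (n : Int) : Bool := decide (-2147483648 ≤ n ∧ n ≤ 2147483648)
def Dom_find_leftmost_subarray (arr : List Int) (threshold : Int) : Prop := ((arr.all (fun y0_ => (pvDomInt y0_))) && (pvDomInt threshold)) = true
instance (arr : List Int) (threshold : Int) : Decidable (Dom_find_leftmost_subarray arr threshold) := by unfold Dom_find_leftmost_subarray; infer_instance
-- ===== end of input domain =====

-- B replaces A's explicit nested index loops by staged passes: a boolean mask built once, then library index searches for the run start and its end (idiomatic decomposition, same O(n) cost).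


-- ===== PORT A =====
-- inner while loop: j advances while arr[j] > threshold; ported over the suffix starting at j
def extendA (t : Int) : List Int → Int → Int
  | [], j => j
  | x :: xs, j => if x > t then extendA t xs (j + 1) else j

-- outer while loop over i
def loopA (t : Int) : List Int → Int → Option Int × Option Int
  | [], _ => (none, none)
  | x :: xs, i => if x > t then (some i, some (extendA t (x :: xs) i - 1)) else loopA t xs (i + 1)

def find_leftmost_subarray (arr : List Int) (threshold : Int) : Option Int × Option Int :=
  loopA threshold arr 0

-- ===== PORT B =====
-- staged passes: boolean mask, then list.index searches (Python's .index raises only when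
-- the element is absent; both calls are guarded by membership tests, so the `none` match
-- arms below are unreachable)
def find_leftmost_subarray_alt (arr : List Int) (threshold : Int) : Option Int × Option Int :=
  let mask := arr.map (fun x => decide (x > threshold))
  if true ∈ mask then
    match PySem.List.index? mask true with
    | none => (none, none)
    | some left =>
      let rest := PySem.List.slice mask (some (left : Int)) none
      if false ∈ rest then
        match PySem.List.index? rest false with
        | none => (none, none)
        | some k => (some (left : Int), some ((left : Int) + (k : Int) - 1))
      else (some (left : Int), some ((arr.length : Int) - 1))
  else (none, none)

-- ===== PRECONDITION & SPEC =====
def Spec_find_leftmost_subarray (arr : List Int) (threshold : Int) (out : Option Int × Option Int) : Prop := out = find_leftmost_subarray_alt arr threshold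
instance (arr : List Int) (threshold : Int) (out : Option Int × Option Int) : Decidable (Spec_find_leftmost_subarray arr threshold out) := by unfold Spec_find_leftmost_subarray; infer_instance

-- ===== CLAIM =====
def Claim_equal_find_leftmost_subarray : Prop := ∀ (arr : List Int) (threshold : Int), Dom_find_leftmost_subarray arr threshold → Spec_find_leftmost_subarray arr threshold (find_leftmost_subarray arr threshold)

-- ===== LEMMAS AND PROOFS =====
theorem extendA_eq (t : Int) : ∀ (xs : List Int) (j : Int),
    extendA t xs j = j + ((xs.takeWhile (fun x => decide (x > t))).length : Int) := by
  intro xs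
  induction xs with
  | nil => intro j; simp [extendA]
  | cons x xs ih =>
    intro j
    by_cases h : x > t
    · simp [extendA, h, ih]; ring
    · simp [extendA, h]

-- characterization of A's loop via the first index where the mask is true
theorem loopA_char (t : Int) : ∀ (xs : List Int) (i : Int),
    loopA t xs i =
      match List.idxOf? true (xs.map (fun x => decide (x > t))) with
      | none => (none, none)
      | some l => (some (i + (l : Int)),
                   some (i + (l : Int) + (((xs.drop l).takeWhile (fun x => decide (x > t))).length : Int) - 1)) := by
  intro xs
  induction xs with
  | nil => intro i; simp [loopA]
  | cons x xs ih =>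
    intro i
    by_cases h : x > t
    · simp [loopA, h, List.idxOf?_cons, extendA_eq, extendA]
      ring
    · simp only [loopA, if_neg h, List.map_cons, List.idxOf?_cons]
      have hx : (decide (x > t) == true) = false := by simp [h]
      rw [hx]
      simp only [Bool.false_eq_true, if_false]
      rw [ih]
      cases hix : List.idxOf? true (xs.map (fun x => decide (x > t))) with
      | none => simp
      | some l =>
        simp [List.drop_succ_cons]
        omega

-- first false in a Bool list sits right after the leading true run
theorem idxOf_false_bool : ∀ (bs : List Bool),
    List.idxOf? false bs =
      if false ∈ bs then some ((bs.takeWhile (fun b => b)).length) else none := by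
  intro bs
  induction bs with
  | nil => simp
  | cons b bs ih =>
    cases b with
    | false => simp [List.idxOf?_cons]
    | true =>
      simp only [List.idxOf?_cons]
      rw [ih]
      by_cases h : false ∈ bs <;> simp [h]

theorem takeWhile_eq_self_of_all_true : ∀ (bs : List Bool), (∀ b ∈ bs, b = true) →
    bs.takeWhile (fun b => b) = bs := by
  intro bs
  induction bs with
  | nil => intro _; rfl
  | cons b bs ih =>
    intro h
    have hb := h b (by simp)
    simp [hb, ih (fun x hx => h x (by simp [hx]))]

-- ===== VERDICT =====
theorem find_leftmost_subarray_spec : Claim_equal_find_leftmost_subarray := by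
  intro arr t _
  unfold Spec_find_leftmost_subarray find_leftmost_subarray find_leftmost_subarray_alt
  rw [loopA_char]
  simp only [PySem.List.index?_eq_idxOf?]
  by_cases hmem : true ∈ arr.map (fun x => decide (x > t))
  · rw [if_pos hmem]
    obtain ⟨l, hix⟩ := Option.isSome_iff_exists.mp (List.isSome_idxOf?.mpr hmem)
    have hlen : l < arr.length := by
      obtain ⟨hl, -, -⟩ := List.idxOf?_eq_some_iff.mp hix
      simpa using hl
    rw [hix]
    simp only
    have hslice : PySem.List.slice (arr.map (fun x => decide (x > t))) (some (l : Int)) none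
        = (arr.drop l).map (fun x => decide (x > t)) := by
      rw [PySem.List.slice_from_natCast]
      simp [List.map_drop]
    rw [hslice]
    by_cases hf : false ∈ (arr.drop l).map (fun x => decide (x > t))
    · rw [if_pos hf, idxOf_false_bool, if_pos hf, List.takeWhile_map]
      simp [Function.comp_def]
    · rw [if_neg hf]
      have hall : ∀ b ∈ (arr.drop l).map (fun x => decide (x > t)), b = true := by
        intro b hb
        cases b with
        | false => exact absurd hb hf
        | true => rfl
      have hrun : ((arr.drop l).takeWhile (fun x => decide (x > t))).length = arr.length - l := by
        have h1 := takeWhile_eq_self_of_all_true _ hall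
        rw [List.takeWhile_map] at h1
        have h2 := congrArg List.length h1
        simpa [Function.comp_def] using h2
      rw [hrun]
      simp only [Prod.mk.injEq, Option.some.injEq]
      exact ⟨by ring, by omega⟩
  · rw [if_neg hmem, List.idxOf?_eq_none_iff.mpr hmem]
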